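-- pv_equiv track=rewrite | github.com/ML-engineering-Freelancerroma/Contests | T_Bank_Вечный_контест/5_Макс_тестов.py | count_same_digit_numbers
-- ===== SOURCE A (Python) =====
-- def count_same_digit_numbers(x, y):
--     count = 0
--     for digit in range(1, 10):
--         num = digit
--         while num <= y:
--             if num >= x:
--                 count += 1
--             num = num * 10 + digit
--     return count
-- ===== SOURCE B (Python) =====
-- def count_same_digit_numbers(x, y):
--     count = 0
--     length = 1
--     while (10 ** length - 1) // 9 <= y:
--         r = (10 ** length - 1) // 9  # repunit of this length: 1, 11, 111, ...
--         for d in range(1, 10):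
--             n = d * r
--             if x <= n <= y:
--                 count += 1
--         length += 1
--     return count
-- ===== Notes on version B (the rewrite author's own statement) =====
-- stated objective: alternative
-- what changed: B iterates over digit-string lengths using the closed-form repunit (10**L-1)//9 and forms each candidate as d*repunit, instead of A's per-digit inner while loop growing num = num*10+digit; the loop nesting is inverted (lengths outer, digits inner) and stops once the smallest length-L repdigit exceeds y.
import Mathlib
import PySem

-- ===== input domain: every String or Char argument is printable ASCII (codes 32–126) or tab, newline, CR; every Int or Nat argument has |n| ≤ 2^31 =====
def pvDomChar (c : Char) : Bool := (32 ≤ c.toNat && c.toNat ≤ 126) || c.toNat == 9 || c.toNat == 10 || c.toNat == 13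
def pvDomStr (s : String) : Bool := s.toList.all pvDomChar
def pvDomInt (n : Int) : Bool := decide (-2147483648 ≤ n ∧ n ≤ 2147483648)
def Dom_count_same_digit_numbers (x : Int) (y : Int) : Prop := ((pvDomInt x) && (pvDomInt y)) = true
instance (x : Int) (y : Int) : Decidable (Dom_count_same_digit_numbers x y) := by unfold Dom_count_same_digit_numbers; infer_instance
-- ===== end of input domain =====

-- B inverts the loop nesting: it iterates over digit-string lengths via the closed-form
-- repunit (10^L - 1)//9 and forms each candidate as d * repunit, instead of A's per-digit
-- inner while loop growing num = num*10+digit (objective: alternative decomposition).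

-- ===== PORT A =====
-- inner while loop of A for one digit: while num <= y: if num >= x: count += 1; num = num*10+digit
-- (the second guard only makes the recursion total; it holds on every call A makes, where digit ≥ 1, num ≥ 1)
def aLoop (x y digit num count : Int) : Int :=
  if _h1 : num ≤ y then
    if _h2 : num < num * 10 + digit then
      aLoop x y digit (num * 10 + digit) (if num ≥ x then count + 1 else count)
    else count
  else count
termination_by (y + 1 - num).toNat
decreasing_by omega

def count_same_digit_numbers (x : Int) (y : Int) : Int :=
  (PySem.List.pyRange 1 10 1).foldl (fun count digit => aLoop x y digit digit count) 0

-- ===== PORT B =====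
-- recursive value of the repunit (10^L - 1)//9 (used by bLoop's termination proof)
def pvRep : Nat → Int
  | 0 => 0
  | n + 1 => 10 * pvRep n + 1

theorem pvRep_nonneg (L : Nat) : 0 ≤ pvRep L := by
  induction L with
  | zero => simp [pvRep]
  | succ n ih => simp only [pvRep]; omega

theorem pvRep_floordiv (L : Nat) : PySem.Int.floordiv ((10:Int) ^ L - 1) 9 = pvRep L := by
  have h9 : (0:Int) < 9 := by norm_num
  rw [PySem.Int.floordiv_eq_ediv_of_pos h9]
  have hmul : (10:Int) ^ L - 1 = 9 * pvRep L := by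
    induction L with
    | zero => simp [pvRep]
    | succ n ih =>
      simp only [pvRep, pow_succ]
      nlinarith [ih]
  rw [hmul, Int.mul_ediv_cancel_left _ (by norm_num)]

-- B's while loop: while (10**length - 1)//9 <= y: r = (10**length-1)//9; for d in range(1,10): …; length += 1
-- (the Python binds r to the same expression as the condition; it is written inline here)
def bLoop (x y : Int) (length : Nat) (count : Int) : Int :=
  if _h : PySem.Int.floordiv ((10:Int) ^ length - 1) 9 ≤ y then
    bLoop x y (length + 1)
      ((PySem.List.pyRange 1 10 1).foldl
        (fun c d => if x ≤ d * PySem.Int.floordiv ((10:Int) ^ length - 1) 9 ∧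
                        d * PySem.Int.floordiv ((10:Int) ^ length - 1) 9 ≤ y
                    then c + 1 else c) count)
  else count
termination_by (y + 1 - PySem.Int.floordiv ((10:Int) ^ length - 1) 9).toNat
decreasing_by
  have e1 := pvRep_floordiv length
  have e2 := pvRep_floordiv (length + 1)
  have h0 := pvRep_nonneg length
  have h1 : pvRep (length + 1) = 10 * pvRep length + 1 := rfl
  omega

def count_same_digit_numbers_alt (x : Int) (y : Int) : Int :=
  bLoop x y 1 0

-- ===== PRECONDITION & SPEC =====
def Spec_count_same_digit_numbers (x : Int) (y : Int) (out : Int) : Prop := out = count_same_digit_numbers_alt x y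
instance (x : Int) (y : Int) (out : Int) : Decidable (Spec_count_same_digit_numbers x y out) := by unfold Spec_count_same_digit_numbers; infer_instance

-- ===== CLAIM (what is proved, stated in full; the proofs are below) =====
def Claim_equal_count_same_digit_numbers : Prop := ∀ (x : Int) (y : Int), Dom_count_same_digit_numbers x y → Spec_count_same_digit_numbers x y (count_same_digit_numbers x y)

-- ===== LEMMAS AND PROOFS =====

theorem aLoop_add (x y d num c : Int) : aLoop x y d num c = c + aLoop x y d num 0 := by
  conv_lhs => rw [aLoop]
  conv_rhs => rw [aLoop]
  split_ifs with h1 h2 hx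
  · rw [aLoop_add x y d (num * 10 + d) (c + 1), aLoop_add x y d (num * 10 + d) ((0:Int) + 1)]
    ring
  · rw [aLoop_add x y d (num * 10 + d) c]
  · ring
  · ring
termination_by (y + 1 - num).toNat
decreasing_by all_goals omega

theorem aLoop_stop (x y d num c : Int) (h : y < num) : aLoop x y d num c = c := by
  rw [aLoop]; rw [dif_neg (by omega)]

theorem aLoop_step (x y d : Int) (L : Nat) (hd : 1 ≤ d) :
    aLoop x y d (d * pvRep L) 0
      = (if x ≤ d * pvRep L ∧ d * pvRep L ≤ y then 1 else 0) + aLoop x y d (d * pvRep (L + 1)) 0 := by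
  have h0 : 0 ≤ d * pvRep L := mul_nonneg (by omega) (pvRep_nonneg L)
  have hnext : d * pvRep L * 10 + d = d * pvRep (L + 1) := by
    have h1 : pvRep (L + 1) = 10 * pvRep L + 1 := rfl
    rw [h1]; ring
  by_cases hy : d * pvRep L ≤ y
  · rw [aLoop]
    rw [dif_pos hy, dif_pos (by omega)]
    rw [hnext, aLoop_add]
    by_cases hx : x ≤ d * pvRep L
    · rw [if_pos (by omega : d * pvRep L ≥ x), if_pos ⟨hx, hy⟩]
      ring
    · rw [if_neg (by omega : ¬ d * pvRep L ≥ x), if_neg (by omega)]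
  · rw [aLoop_stop x y d _ 0 (by omega)]
    rw [aLoop_stop x y d _ 0 (by omega)]
    rw [if_neg (by omega)]
    ring

theorem foldl_ite_sum (P : Int → Prop) [DecidablePred P] (l : List Int) (c : Int) :
    l.foldl (fun c d => if P d then c + 1 else c) c
      = c + (l.map (fun d => if P d then (1:Int) else 0)).sum := by
  induction l generalizing c with
  | nil => simp
  | cons a t ih =>
    simp only [List.foldl_cons, List.map_cons, List.sum_cons]
    rw [ih]
    split_ifs <;> ring

theorem foldl_aLoop_sum (x y : Int) (l : List Int) (c : Int) :
    l.foldl (fun c d => aLoop x y d d c) c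
      = c + (l.map (fun d => aLoop x y d d 0)).sum := by
  induction l generalizing c with
  | nil => simp
  | cons a t ih =>
    simp only [List.foldl_cons, List.map_cons, List.sum_cons]
    rw [ih, aLoop_add]
    ring

theorem sum_map_split (f g : Int → Int) (l : List Int) :
    (l.map (fun d => f d + g d)).sum = (l.map f).sum + (l.map g).sum := by
  induction l with
  | nil => simp
  | cons a t ih => simp only [List.map_cons, List.sum_cons]; rw [ih]; ring

theorem bLoop_add (x y : Int) (L : Nat) (c : Int) : bLoop x y L c = c + bLoop x y L 0 := by
  conv_lhs => rw [bLoop]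
  conv_rhs => rw [bLoop]
  split_ifs with h
  · conv_lhs => rw [bLoop_add x y (L + 1)]
    conv_rhs => rw [bLoop_add x y (L + 1)]
    rw [foldl_ite_sum (fun d => x ≤ d * PySem.Int.floordiv ((10:Int) ^ L - 1) 9 ∧
                                 d * PySem.Int.floordiv ((10:Int) ^ L - 1) 9 ≤ y)
          (PySem.List.pyRange 1 10 1) c,
        foldl_ite_sum (fun d => x ≤ d * PySem.Int.floordiv ((10:Int) ^ L - 1) 9 ∧
                                 d * PySem.Int.floordiv ((10:Int) ^ L - 1) 9 ≤ y)
          (PySem.List.pyRange 1 10 1) 0]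
    ring
  · ring
termination_by (y + 1 - PySem.Int.floordiv ((10:Int) ^ L - 1) 9).toNat
decreasing_by
  all_goals
    have e1 := pvRep_floordiv L
    have e2 := pvRep_floordiv (L + 1)
    have h0 := pvRep_nonneg L
    have h1 : pvRep (L + 1) = 10 * pvRep L + 1 := rfl
    omega

theorem key_sum (x y : Int) (L : Nat) :
    ((PySem.List.pyRange 1 10 1).map (fun d => aLoop x y d (d * pvRep L) 0)).sum
      = bLoop x y L 0 := by
  rw [bLoop]
  simp only [pvRep_floordiv]
  by_cases hy : pvRep L ≤ y
  · rw [dif_pos hy]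
    rw [bLoop_add x y (L + 1)]
    rw [foldl_ite_sum (fun d => x ≤ d * pvRep L ∧ d * pvRep L ≤ y) (PySem.List.pyRange 1 10 1) 0]
    rw [← key_sum x y (L + 1)]
    have hcong : (PySem.List.pyRange 1 10 1).map (fun d => aLoop x y d (d * pvRep L) 0)
        = (PySem.List.pyRange 1 10 1).map
            (fun d => (if x ≤ d * pvRep L ∧ d * pvRep L ≤ y then (1:Int) else 0)
              + aLoop x y d (d * pvRep (L + 1)) 0) := by
      apply List.map_congr_left
      intro d hd
      have h1d : 1 ≤ d := ((PySem.List.mem_pyRange_one).1 hd).1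
      exact aLoop_step x y d L h1d
    rw [hcong, sum_map_split]
    ring
  · rw [dif_neg hy]
    have hcong : (PySem.List.pyRange 1 10 1).map (fun d => aLoop x y d (d * pvRep L) 0)
        = (PySem.List.pyRange 1 10 1).map (fun _ => (0:Int)) := by
      apply List.map_congr_left
      intro d hd
      have h1d : 1 ≤ d := ((PySem.List.mem_pyRange_one).1 hd).1
      have h0 := pvRep_nonneg L
      have hge : pvRep L ≤ d * pvRep L := le_mul_of_one_le_left h0 h1d
      exact aLoop_stop x y d _ 0 (by omega)
    rw [hcong]
    simp
termination_by (y + 1 - pvRep L).toNat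
decreasing_by
  have h0 := pvRep_nonneg L
  have h1 : pvRep (L + 1) = 10 * pvRep L + 1 := rfl
  omega

-- ===== VERDICT (by name: the statement is the Claim_ definition above) =====
theorem count_same_digit_numbers_spec : Claim_equal_count_same_digit_numbers := by
  intro x y _
  unfold Spec_count_same_digit_numbers count_same_digit_numbers count_same_digit_numbers_alt
  rw [foldl_aLoop_sum]
  have h1 : (fun d => aLoop x y d d 0) = (fun d => aLoop x y d (d * pvRep 1) 0) := by
    funext d
    have h2 : pvRep 1 = 1 := rfl
    rw [h2, mul_one]
  rw [h1, key_sum]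
  ring
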